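-- pv_equiv track=rewrite | github.com/mlockwood/go_transit_src | scripts/archive/deprecated.py | stack_times
-- ===== SOURCE A (Python) =====
-- def stack_times(a, n):
--     i = 0
--     b = []
--     c = []
--     for entry in sorted(a):
--         if i < n:
--             c.append(entry)
--             i += 1
--         elif i == n:
--             b.append(c)
--             c = [entry]
--             i = 1
--     while i < n:
--         c.append('')
--         i += 1
--     b.append(c)
--     return [list(x) for x in zip(*b)]
-- ===== SOURCE B (Python) =====
-- def stack_times(a, n):
--     if n <= 0:
--         return []
--     s = sorted(a)
--     num = max(1, -(-len(s) // n))
--     return [[s[c * n + r] if c * n + r < len(s) else '' for c in range(num)]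
--             for r in range(n)]
-- ===== Notes on version B (the rewrite author's own statement) =====
-- stated objective: simpler
-- what changed: B computes the transposed table directly in row-major order by index arithmetic over the sorted list (one double comprehension), instead of building per-column chunks with a stateful loop, padding with a while loop, and transposing with zip(*b).
import Mathlib
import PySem

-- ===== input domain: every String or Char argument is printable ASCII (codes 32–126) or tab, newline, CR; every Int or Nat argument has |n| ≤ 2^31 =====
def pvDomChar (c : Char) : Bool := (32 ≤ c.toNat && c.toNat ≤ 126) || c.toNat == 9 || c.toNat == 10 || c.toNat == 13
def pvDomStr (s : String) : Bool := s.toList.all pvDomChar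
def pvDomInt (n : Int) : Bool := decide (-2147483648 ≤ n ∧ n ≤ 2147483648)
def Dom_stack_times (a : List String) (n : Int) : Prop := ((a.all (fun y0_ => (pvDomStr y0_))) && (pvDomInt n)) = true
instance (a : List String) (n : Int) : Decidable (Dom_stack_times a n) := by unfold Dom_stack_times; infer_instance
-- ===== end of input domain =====

-- B builds the transposed table directly by index arithmetic over the sorted list
-- (one double comprehension), instead of A's stateful chunking loop + while-padding + zip transpose.

-- ===== PORT A =====
-- one step of A's for-loop over sorted(a): state (i, b, c)
def stAstep (n : Int) (s : Int × List (List String) × List String) (entry : String) :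
    Int × List (List String) × List String :=
  if s.1 < n then (s.1 + 1, s.2.1, s.2.2 ++ [entry])
  else if s.1 = n then (1, s.2.1 ++ [s.2.2], [entry])
  else s

-- A's "while i < n: c.append('')"
def stAPad (n i : Int) (c : List String) : List String :=
  if _h : i < n then stAPad n (i + 1) (c ++ [""]) else c
  termination_by (n - i).toNat
  decreasing_by omega

-- zip(*rest) with first list b0: truncating transpose, exactly Python's zip
def pvZipAux : List String → List (List String) → List (List String)
  | [], _ => []
  | x :: xs, rest =>
      if rest.any (fun r => r.isEmpty) then []
      else (x :: rest.map (fun r => r.headD "")) :: pvZipAux xs (rest.map (fun r => r.tail))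

def pvZipStar : List (List String) → List (List String)
  | [] => []
  | b0 :: rest => pvZipAux b0 rest

def stack_times (a : List String) (n : Int) : List (List String) :=
  let st := (PySem.List.sorted a id false).foldl (stAstep n) (0, [], [])
  pvZipStar (st.2.1 ++ [stAPad n st.1 st.2.2])

-- ===== PORT B =====
def stack_times_alt (a : List String) (n : Int) : List (List String) :=
  if n ≤ 0 then []
  else
    let s := PySem.List.sorted a id false
    let num : Int := max 1 (-(PySem.Int.floordiv (-(s.length : Int)) n))
    (PySem.List.pyRange 0 n 1).map (fun r =>
      (PySem.List.pyRange 0 num 1).map (fun c =>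
        if c * n + r < (s.length : Int) then PySem.List.pyGetD s (c * n + r) "" else ""))

-- ===== PRECONDITION & SPEC =====
def Spec_stack_times (a : List String) (n : Int) (out : List (List String)) : Prop := out = stack_times_alt a n
instance (a : List String) (n : Int) (out : List (List String)) : Decidable (Spec_stack_times a n out) := by unfold Spec_stack_times; infer_instance

-- ===== CLAIM (what is proved, stated in full; the proofs are below) =====
def Claim_equal_stack_times : Prop := ∀ (a : List String) (n : Int), Dom_stack_times a n → Spec_stack_times a n (stack_times a n)

-- ===== LEMMAS AND PROOFS =====

-- reference chunking: sorted list cut into columns of size N, last one padded with ""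
def chunksF (N : Nat) (xs : List String) : List (List String) :=
  if _h : N < xs.length ∧ 0 < N then xs.take N :: chunksF N (xs.drop N)
  else [xs ++ List.replicate (N - xs.length) ""]
  termination_by xs.length
  decreasing_by simp; omega

-- number of columns
def numC (N L : Nat) : Nat := max 1 ((L + N - 1) / N)

theorem chunksF_step (N : Nat) (xs : List String) (h : N < xs.length ∧ 0 < N) :
    chunksF N xs = xs.take N :: chunksF N (xs.drop N) := by
  conv_lhs => rw [chunksF.eq_def]
  rw [dif_pos h]

theorem chunksF_base (N : Nat) (xs : List String) (h : ¬ (N < xs.length ∧ 0 < N)) :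
    chunksF N xs = [xs ++ List.replicate (N - xs.length) ""] := by
  conv_lhs => rw [chunksF.eq_def]
  rw [dif_neg h]

-- A's loop fills c while i + remaining ≤ n
theorem foldl_fill (n : Int) : ∀ (xs : List String) (i : Int) (b : List (List String)) (c : List String),
    0 ≤ i → i + xs.length ≤ n →
    xs.foldl (stAstep n) (i, b, c) = (i + xs.length, b, c ++ xs) := by
  intro xs
  induction xs with
  | nil => intro i b c _ _; simp
  | cons x t ih =>
    intro i b c hi hle
    have hx : i < n := by simp at hle; omega
    rw [List.foldl_cons, show stAstep n (i, b, c) x = (i + 1, b, c ++ [x]) from by simp [stAstep, hx],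
        ih (i + 1) b (c ++ [x]) (by omega) (by simp at hle ⊢; omega)]
    simp [Prod.ext_iff]
    push_cast
    ring

theorem foldl_skip (n : Int) (hn : n < 0) : ∀ (xs : List String),
    xs.foldl (stAstep n) (0, ([] : List (List String)), ([] : List String)) = (0, [], []) := by
  intro xs
  have : ∀ (t : List String), t.foldl (stAstep n) ((0 : Int), ([] : List (List String)), ([] : List String)) = (0, [], []) := by
    intro t
    induction t with
    | nil => rfl
    | cons x t ih =>
      have h1 : ¬ ((0:Int) < n) := by omega
      have h2 : ¬ ((0:Int) = n) := by omega
      simp [List.foldl, stAstep, h1, h2, ih]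
  exact this xs

theorem foldl_zero_frozen : ∀ (t : List String) (b : List (List String)) (c : List String),
    t.foldl (stAstep 0) (1, b, c) = (1, b, c) := by
  intro t
  induction t with
  | nil => intro b c; rfl
  | cons x t ih => intro b c; simp [List.foldl, stAstep, ih]

theorem pad_eq (n : Int) : ∀ (k : Nat) (i : Int) (c : List String), (n - i).toNat = k →
    stAPad n i c = c ++ List.replicate (n - i).toNat "" := by
  intro k
  induction k with
  | zero =>
    intro i c hk
    have : ¬ i < n := by omega
    unfold stAPad; simp [this, hk]
  | succ m ih =>
    intro i c hk
    have hlt : i < n := by omega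
    have := ih (i + 1) (c ++ [""]) (by omega)
    unfold stAPad
    simp only [hlt, dif_pos, this, List.append_assoc]
    congr 1
    have h1 : (n - i).toNat = (n - (i+1)).toNat + 1 := by omega
    rw [h1, List.replicate_succ]
    simp

-- the whole loop + padding + final append equals chunking
theorem run_eq_chunks (n : Int) (hn : 0 < n) : ∀ (xs : List String) (b : List (List String)),
    (let st := xs.foldl (stAstep n) (0, b, []);
     st.2.1 ++ [stAPad n st.1 st.2.2]) = b ++ chunksF n.toNat xs := by
  intro xs
  induction hL : xs.length using Nat.strong_induction_on generalizing xs with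
  | _ L ih =>
  intro b
  by_cases hle : xs.length ≤ n.toNat
  · have hfold := foldl_fill n xs 0 b [] (by omega) (by omega)
    simp only [zero_add] at hfold
    simp only [hfold, List.nil_append]
    have hch := chunksF_base n.toNat xs (by omega)
    rw [hch, pad_eq n (n - (xs.length : Int)).toNat xs.length xs rfl]
    have : (n - (xs.length : Int)).toNat = n.toNat - xs.length := by omega
    rw [this]
  · -- long list: first chunk flushes, recurse on the rest
    push Not at hle
    have hN : 0 < n.toNat := by omega
    have hsplit : xs = xs.take n.toNat ++ xs.drop n.toNat := (List.take_append_drop _ _).symm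
    obtain ⟨d, ds, hd⟩ : ∃ d ds, xs.drop n.toNat = d :: ds := by
      cases hdp : xs.drop n.toNat with
      | nil => exfalso; have := List.length_drop (l := xs) (i := n.toNat); rw [hdp] at this; simp at this; omega
      | cons d ds => exact ⟨d, ds, rfl⟩
    have hfold1 := foldl_fill n (xs.take n.toNat) 0 b [] (by omega)
      (by simp [List.length_take]; omega)
    have hlen_take : ((xs.take n.toNat).length : Int) = n := by
      simp [List.length_take]; omega
    conv_lhs => rw [hsplit]
    rw [List.foldl_append, hfold1]
    simp only [zero_add, hlen_take, List.nil_append, hd]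
    -- step on d from state (n, b, take) = step from (0, b ++ [take], []) then the rest
    have hstep : stAstep n (n, b, xs.take n.toNat) d = (1, b ++ [xs.take n.toNat], [d]) := by
      simp [stAstep]
    have hstep0 : stAstep n ((0 : Int), b ++ [xs.take n.toNat], ([] : List String)) d
        = (1, b ++ [xs.take n.toNat], [d]) := by
      simp [stAstep, hn]
    rw [List.foldl_cons, hstep]
    have hlt : (xs.drop n.toNat).length < L := by
      rw [← hL]; simp; omega
    have hrec := ih (xs.drop n.toNat).length hlt (xs.drop n.toNat) rfl (b ++ [xs.take n.toNat])
    rw [hd] at hrec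
    rw [List.foldl_cons, hstep0] at hrec
    rw [← hd] at hrec
    rw [hrec]
    have hch := chunksF_step n.toNat xs ⟨hle, hN⟩
    rw [hch, List.append_assoc]
    rfl

-- every column of chunksF has length N
theorem chunksF_len (N : Nat) (hN : 0 < N) : ∀ (xs : List String), ∀ col ∈ chunksF N xs, col.length = N := by
  intro xs
  induction hL : xs.length using Nat.strong_induction_on generalizing xs with
  | _ L ih =>
  intro col hcol
  by_cases h : N < xs.length ∧ 0 < N
  · rw [chunksF_step N xs h] at hcol
    rcases List.mem_cons.mp hcol with h1 | h2
    · simp [h1, List.length_take]; omega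
    · exact ih (xs.drop N).length (by simp [← hL]; omega) _ rfl col h2
  · rw [chunksF_base N xs h] at hcol
    simp at hcol
    have : xs.length ≤ N := by omega
    simp [hcol]; omega

theorem chunksF_ne_nil (N : Nat) (xs : List String) : chunksF N xs ≠ [] := by
  by_cases h : N < xs.length ∧ 0 < N
  · rw [chunksF_step N xs h]; simp
  · rw [chunksF_base N xs h]; simp

-- headD/getD bridge
theorem headD_eq_getD (l : List String) : l.headD "" = l.getD 0 "" := by
  cases l <;> rfl

theorem getD_tail (l : List String) (j : Nat) : l.tail.getD j "" = l.getD (j + 1) "" := by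
  cases l <;> simp [List.getD]

-- transpose of a rectangular table, row by row
theorem zipAux_rect : ∀ (b0 : List String) (rest : List (List String)),
    (∀ r ∈ rest, r.length = b0.length) →
    pvZipAux b0 rest = (List.range b0.length).map (fun j => (b0 :: rest).map (fun col => col.getD j "")) := by
  intro b0
  induction b0 with
  | nil => intro rest _; simp [pvZipAux]
  | cons x xs ih =>
    intro rest hlen
    have hne : ¬ (rest.any (fun r => r.isEmpty)) = true := by
      intro hcon
      rcases List.any_eq_true.mp hcon with ⟨r, hr, hemp⟩
      have hl := hlen r hr
      rw [List.isEmpty_iff.mp hemp] at hl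
      simp at hl
    have htails : ∀ r ∈ rest.map (fun r => r.tail), r.length = xs.length := by
      intro r hr
      simp at hr
      obtain ⟨r0, hr0, rfl⟩ := hr
      have := hlen r0 hr0
      simp [List.length_tail, this]
    rw [pvZipAux, if_neg hne, ih _ htails]
    rw [List.length_cons, List.range_succ_eq_map]
    simp only [List.map_cons, List.map_map]
    refine List.cons_eq_cons.mpr ⟨?_, ?_⟩
    · rw [List.getD_cons_zero]
      refine congrArg (x :: ·) ?_
      apply List.map_congr_left
      intro r _
      exact headD_eq_getD r
    · apply List.map_congr_left
      intro j _
      simp only [Function.comp]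
      refine List.cons_eq_cons.mpr ⟨?_, ?_⟩
      · exact (List.getD_cons_succ).symm
      · apply List.map_congr_left
        intro r _
        exact getD_tail r j

-- chunk columns written by index arithmetic
theorem take_eq_range_map (xs : List String) (N : Nat) (h : N ≤ xs.length) :
    xs.take N = (List.range N).map (fun j => xs.getD j "") := by
  apply List.ext_getElem
  · simp [List.length_take]; omega
  · intro i h1 h2
    simp [List.length_take] at h1
    simp [List.getD, List.getElem?_eq_getElem (by omega : i < xs.length)]

theorem pad_eq_range_map (xs : List String) (N : Nat) (h : xs.length ≤ N) :
    xs ++ List.replicate (N - xs.length) "" = (List.range N).map (fun j => xs.getD j "") := by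
  apply List.ext_getElem
  · simp; omega
  · intro i h1 h2
    simp at h1
    by_cases hi : i < xs.length
    · rw [List.getElem_append_left hi]
      simp [List.getD, List.getElem?_eq_getElem hi]
    · rw [List.getElem_append_right (by omega)]
      simp [List.getD, List.getElem?_eq_none (by omega : xs.length ≤ i)]

theorem numC_step (N L : Nat) (hN : 0 < N) (hL : N < L) : numC N L = numC N (L - N) + 1 := by
  unfold numC
  have h1 : L + N - 1 = (L - N + N - 1) + N := by omega
  rw [h1, Nat.add_div_right _ hN]
  have h2 : 1 ≤ (L - N + N - 1) / N := by
    apply (Nat.one_le_div_iff hN).mpr; omega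
  omega

theorem chunksF_eq_cols (N : Nat) (hN : 0 < N) : ∀ (xs : List String),
    chunksF N xs = (List.range (numC N xs.length)).map
      (fun c => (List.range N).map (fun j => xs.getD (c * N + j) "")) := by
  intro xs
  induction hL : xs.length using Nat.strong_induction_on generalizing xs with
  | _ L ih =>
  subst hL
  by_cases h : N < xs.length
  · rw [chunksF_step N xs ⟨h, hN⟩]
    rw [ih (xs.drop N).length (by simp; omega) _ rfl]
    have hnum : numC N xs.length = numC N (xs.length - N) + 1 := numC_step N xs.length hN h
    rw [hnum, List.range_succ_eq_map]
    simp only [List.map_cons, List.map_map]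
    congr 1
    · simp only [Nat.zero_mul, Nat.zero_add]
      exact take_eq_range_map xs N (by omega)
    · rw [show (xs.drop N).length = xs.length - N by simp]
      apply List.map_congr_left
      intro c _
      simp only [Function.comp]
      apply List.map_congr_left
      intro j _
      rw [List.getD, List.getD, List.getElem?_drop]
      have hidx : N + (c * N + j) = Nat.succ c * N + j := by rw [Nat.succ_mul]; omega
      rw [hidx]
  · rw [chunksF_base N xs (by omega)]
    have hnum : numC N xs.length = 1 := by
      unfold numC
      have : (xs.length + N - 1) / N < 2 := (Nat.div_lt_iff_lt_mul hN).mpr (by omega)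
      omega
    rw [hnum]
    simp only [List.range_one, List.map_cons, List.map_nil, Nat.zero_mul, Nat.zero_add]
    rw [pad_eq_range_map xs N (by omega)]

-- ceiling division: B's -(-L // n) equals the Nat ceiling
theorem ceil_div_eq (L N : Nat) (hN : 0 < N) :
    -(PySem.Int.floordiv (-(L : Int)) (N : Int)) = ((L + N - 1) / N : Nat) := by
  have hfd : PySem.Int.floordiv (-(L : Int)) (N : Int) = (-(L : Int)) / (N : Int) := by
    rw [show PySem.Int.floordiv (-(L : Int)) (N : Int) = Int.fdiv (-(L : Int)) (N : Int) from rfl,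
        Int.fdiv_eq_ediv]
    rw [if_pos (Or.inl (by exact_mod_cast Nat.zero_le N))]
    ring
  rw [hfd]
  have hd : (N : Int) * (((L + N - 1) / N : Nat) : Int) + (((L + N - 1) % N : Nat) : Int)
      = ((L + N - 1 : Nat) : Int) := by exact_mod_cast Nat.div_add_mod (L + N - 1) N
  have hd2 : ((L + N - 1 : Nat) : Int) = (L : Int) + (N : Int) - 1 := by omega
  rw [hd2] at hd
  have hm' : (((L + N - 1) % N : Nat) : Int) < (N : Int) := by exact_mod_cast Nat.mod_lt _ hN
  have hm0 : (0 : Int) ≤ (((L + N - 1) % N : Nat) : Int) := by positivity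
  have key : (-(L : Int)) =
      ((N : Int) * (((L + N - 1) / N : Nat) : Int) - L) +
        (N : Int) * (-((((L + N - 1) / N : Nat)) : Int)) := by ring
  rw [key, Int.add_mul_ediv_left _ _ (by exact_mod_cast hN.ne' : (N : Int) ≠ 0)]
  rw [Int.ediv_eq_zero_of_lt (by linarith) (by linarith)]
  ring

-- getD of a range-mapped list
theorem getD_range_map (f : Nat → String) (N j : Nat) (hj : j < N) :
    ((List.range N).map f).getD j "" = f j := by
  rw [List.getD, List.getElem?_map, List.getElem?_range hj]
  rfl

theorem pyRange_nat (m : Nat) : PySem.List.pyRange 0 (m : Int) 1 = (List.range m).map Nat.cast := by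
  rw [PySem.List.pyRange_one, show ((m : Int) - 0).toNat = m from by omega]
  exact List.map_congr_left (fun k _ => by omega)

theorem pyRange_int (n : Int) (h : 0 ≤ n) :
    PySem.List.pyRange 0 n 1 = (List.range n.toNat).map Nat.cast := by
  rw [PySem.List.pyRange_one, show (n - 0).toNat = n.toNat from by omega]
  exact List.map_congr_left (fun k _ => by omega)

theorem num_eq (L : Nat) (n : Int) (hn : 0 < n) :
    max 1 (-(PySem.Int.floordiv (-(L : Int)) n)) = ((numC n.toNat L : Nat) : Int) := by
  have h1 : ((n.toNat : Nat) : Int) = n := by omega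
  conv_lhs => rw [← h1]
  rw [ceil_div_eq L n.toNat (by omega)]
  unfold numC
  push_cast
  omega

-- main positive case
theorem main_pos (a : List String) (n : Int) (hn : 0 < n) :
    stack_times a n = stack_times_alt a n := by
  have hN : 0 < n.toNat := by omega
  have hn' : ((n.toNat : Nat) : Int) = n := by omega
  have hA : stack_times a n = pvZipStar (chunksF n.toNat (PySem.List.sorted a id false)) := by
    unfold stack_times
    have h1 := run_eq_chunks n hn (PySem.List.sorted a id false) []
    simp only [List.nil_append] at h1
    simp only [h1]
  have hB : stack_times_alt a n =
      (PySem.List.pyRange 0 n 1).map (fun r =>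
        (PySem.List.pyRange 0
            (max 1 (-(PySem.Int.floordiv (-(((PySem.List.sorted a id false).length : Nat) : Int)) n))) 1).map
          (fun c =>
            if c * n + r < (((PySem.List.sorted a id false).length : Nat) : Int)
            then PySem.List.pyGetD (PySem.List.sorted a id false) (c * n + r) "" else "")) := by
    unfold stack_times_alt
    rw [if_neg (by omega)]
  rw [hA, hB]
  obtain ⟨c0, cs, hcs⟩ : ∃ c0 cs, chunksF n.toNat (PySem.List.sorted a id false) = c0 :: cs := by
    cases h : chunksF n.toNat (PySem.List.sorted a id false) with
    | nil => exact absurd h (chunksF_ne_nil n.toNat _)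
    | cons c0 cs => exact ⟨c0, cs, rfl⟩
  have hall := chunksF_len n.toNat hN (PySem.List.sorted a id false)
  rw [hcs] at hall
  have hc0 : c0.length = n.toNat := hall c0 (by simp)
  rw [hcs]
  show pvZipAux c0 cs = _
  rw [zipAux_rect c0 cs (fun r hr => by rw [hall r (by simp [hr]), hc0]), hc0, ← hcs]
  rw [num_eq (PySem.List.sorted a id false).length n hn]
  rw [pyRange_int n (by omega), pyRange_nat]
  simp only [List.map_map]
  apply List.map_congr_left
  intro j hj
  simp only [Function.comp]
  rw [chunksF_eq_cols n.toNat hN (PySem.List.sorted a id false), List.map_map]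
  apply List.map_congr_left
  intro c hc
  simp only [Function.comp]
  have hjN : j < n.toNat := List.mem_range.mp hj
  rw [getD_range_map _ _ j hjN]
  by_cases hin : ((c : Int) * n + (j : Int)
      < (((PySem.List.sorted a id false).length : Nat) : Int))
  · rw [if_pos hin,
        show (c : Int) * n + (j : Int) = ((c * n.toNat + j : Nat) : Int) from by
          push_cast; rw [hn'],
        PySem.List.pyGetD_natCast]
  · rw [if_neg hin]
    have hin' : ¬ ((c : Int) * ((n.toNat : Nat) : Int) + (j : Int)
        < (((PySem.List.sorted a id false).length : Nat) : Int)) := by rwa [hn']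
    have hge : (PySem.List.sorted a id false).length ≤ c * n.toNat + j := by
      have := not_lt.mp hin'
      exact_mod_cast this
    rw [List.getD, List.getElem?_eq_none hge]
    rfl

-- n ≤ 0: A returns []
theorem main_nonpos (a : List String) (n : Int) (hn : n ≤ 0) :
    stack_times a n = stack_times_alt a n := by
  unfold stack_times stack_times_alt
  rw [if_pos hn]
  rcases lt_or_eq_of_le hn with hlt | heq
  · rw [foldl_skip n hlt]
    have hpad : stAPad n 0 [] = [] := by
      unfold stAPad; rw [dif_neg (by omega)]
    simp [hpad, pvZipStar, pvZipAux]
  · subst heq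
    cases hsa : PySem.List.sorted a id false with
    | nil =>
      have hpad : stAPad 0 0 [] = [] := by
        unfold stAPad; rw [dif_neg (by omega)]
      simp [pvZipStar, pvZipAux, hpad]
    | cons x t =>
      have hstep : stAstep 0 ((0 : Int), ([] : List (List String)), ([] : List String)) x = (1, [[]], [x]) := by
        simp [stAstep]
      rw [List.foldl_cons, hstep, foldl_zero_frozen t [[]] [x]]
      have hpad : stAPad 0 1 [x] = [x] := by
        unfold stAPad; rw [dif_neg (by omega)]
      simp [hpad, pvZipStar, pvZipAux]

-- ===== VERDICT (by name: the statement is the Claim_ definition above) =====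
theorem stack_times_spec : Claim_equal_stack_times := by
  intro a n _
  unfold Spec_stack_times
  by_cases h : n ≤ 0
  · exact main_nonpos a n h
  · exact main_pos a n (by omega)
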